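-- pv_equiv track=rewrite | github.com/mjirik/exsu | exsu/dili.py | kick_from_dict
-- ===== SOURCE A (Python) =====
-- import collections
-- import collections
--
-- def kick_from_dict(dct, keys):
--     if type(dct) == collections.OrderedDict:
--         p = collections.OrderedDict()
--     else:
--         p = {}
--     for key, value in dct.items():
--         if key not in keys:
--             p[key] = value
--
--     # p = {key: value for key, value in dct.items() if key not in keys}
--     return p
-- ===== SOURCE B (Python) =====
-- import collections
--
-- def kick_from_dict(dct, keys):
--     # Copy first (same type coercion as A), then delete by scanning keys.
--     if type(dct) == collections.OrderedDict:
--         p = collections.OrderedDict(dct)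
--     else:
--         p = dict(dct)
--     for k in keys:
--         p.pop(k, None)
--     return p
-- ===== Notes on version B (the rewrite author's own statement) =====
-- stated objective: faster
-- what changed: B copies the dict once and then loops over the removal keys popping each with hashed deletion, instead of A's loop over every dct item testing list membership in keys.
import Mathlib
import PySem

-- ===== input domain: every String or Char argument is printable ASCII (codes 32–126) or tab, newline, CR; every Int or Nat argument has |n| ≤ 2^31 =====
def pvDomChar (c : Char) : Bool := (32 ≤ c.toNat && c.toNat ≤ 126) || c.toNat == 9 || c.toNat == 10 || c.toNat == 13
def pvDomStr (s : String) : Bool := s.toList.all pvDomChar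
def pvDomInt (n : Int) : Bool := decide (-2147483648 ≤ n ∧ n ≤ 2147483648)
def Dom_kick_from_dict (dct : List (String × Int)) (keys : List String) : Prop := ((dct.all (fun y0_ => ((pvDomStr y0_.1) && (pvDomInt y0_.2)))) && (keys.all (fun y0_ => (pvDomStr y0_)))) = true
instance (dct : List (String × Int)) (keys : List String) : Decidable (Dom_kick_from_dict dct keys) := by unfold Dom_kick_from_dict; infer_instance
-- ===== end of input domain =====

-- B copies the dict once and then pops each removal key from the copy, instead of A's
-- filter-loop over dct's items testing membership in keys; return value equivalence proved.


-- ===== PORT A =====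
-- p = {}; for key, value in dct.items(): if key not in keys: p[key] = value; return p
def kick_from_dict (dct : List (String × Int)) (keys : List String) : List (String × Int) :=
  (dct.foldl (fun p kv => if keys.contains kv.1 then p else p.insert kv.1 kv.2)
    (PySem.Dict.empty : PySem.Dict String Int)).items

-- ===== PORT B =====
-- p = dict(dct); for k in keys: p.pop(k, None); return p
-- (the copy is the association list of the dict; pop(k, None) deletes every entry keyed k)
def pyPop (items : List (String × Int)) (k : String) : List (String × Int) :=
  items.filter (fun kv => !(kv.1 == k))

def kick_from_dict_alt (dct : List (String × Int)) (keys : List String) : List (String × Int) :=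
  keys.foldl pyPop (PySem.Dict.ofList dct).items

-- ===== PRECONDITION & SPEC =====
def Spec_kick_from_dict (dct : List (String × Int)) (keys : List String) (out : List (String × Int)) : Prop := out = kick_from_dict_alt dct keys
instance (dct : List (String × Int)) (keys : List String) (out : List (String × Int)) : Decidable (Spec_kick_from_dict dct keys out) := by unfold Spec_kick_from_dict; infer_instance

-- ===== CLAIM (what is proved, stated in full; the proofs are below) =====
def Claim_equal_kick_from_dict : Prop := ∀ (dct : List (String × Int)) (keys : List String), Dom_kick_from_dict dct keys → Spec_kick_from_dict dct keys (kick_from_dict dct keys)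

-- ===== LEMMAS AND PROOFS =====

-- B's pop on the item list is exactly Dict.erase on the dict
theorem pyPop_items (d : PySem.Dict String Int) (k : String) :
    pyPop d.items k = (d.erase k).items := rfl

-- B's key loop over the item list is the item list of the erase loop over the dict
theorem popFold_items (keys : List String) (d : PySem.Dict String Int) :
    keys.foldl pyPop d.items = (keys.foldl (fun p k => p.erase k) d).items := by
  induction keys generalizing d with
  | nil => rfl
  | cons k ks ih => simp only [List.foldl_cons, pyPop_items, ih]

-- erasing the just-inserted key gives the same as erasing it from the original dict
theorem erase_insert_self {κ ν : Type} [BEq κ] [LawfulBEq κ]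
    (d : PySem.Dict κ ν) (k : κ) (v : ν) : (d.insert k v).erase k = d.erase k := by
  apply PySem.Dict.ext
  simp only [PySem.Dict.erase, PySem.Dict.items_insert]
  split
  · rw [List.filter_map]
    have h1 : List.filter ((fun (p : κ × ν) => !p.1 == k) ∘ fun p => if (p.1 == k) = true then (k, v) else p) d.items
        = List.filter (fun p => !p.1 == k) d.items := by
      apply List.filter_congr
      intro p _
      by_cases h : p.1 == k <;> simp [h]
    rw [h1]
    have h2 : ∀ p ∈ List.filter (fun (p : κ × ν) => !p.1 == k) d.items,
        (if (p.1 == k) = true then (k, v) else p) = p := by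
      intro p hp
      have := (List.mem_filter.1 hp).2
      simp at this
      simp [this]
    rw [List.map_congr_left h2]
    simp
  · simp

-- erasing a different key commutes with insert
theorem erase_insert_of_ne {κ ν : Type} [BEq κ] [LawfulBEq κ]
    (d : PySem.Dict κ ν) (k k' : κ) (v : ν) (h : k' ≠ k) :
    (d.insert k v).erase k' = (d.erase k').insert k v := by
  apply PySem.Dict.ext
  have hc : (d.erase k').contains k = d.contains k := by
    simp only [PySem.Dict.contains, PySem.Dict.erase, List.any_filter]
    refine List.any_congr rfl ?_
    intro p
    by_cases hpk : p.1 == k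
    · have hne : (p.1 == k') = false := by
        rcases hb : p.1 == k' with _ | _
        · rfl
        · exact absurd (by rw [← eq_of_beq hb, eq_of_beq hpk]) h
      simp [hpk, hne]
    · simp [hpk]
  simp only [PySem.Dict.erase, PySem.Dict.items_insert]
  rw [show ({items := List.filter (fun (p : κ × ν) => !p.1 == k') d.items} : PySem.Dict κ ν) = d.erase k' from rfl, hc]
  split
  · rw [List.filter_map]
    congr 1
    apply List.filter_congr
    intro p _
    by_cases hpk : p.1 == k
    · have hne : (p.1 == k') = false := by
        rcases hb : p.1 == k' with _ | _
        · rfl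
        · exact absurd (by rw [← eq_of_beq hb, eq_of_beq hpk]) h
      have hkk' : (k == k') = false := by
        rcases hb : k == k' with _ | _
        · rfl
        · exact absurd (eq_of_beq hb).symm h
      simp [hpk, hne, hkk']
    · simp [hpk]
  · simp only [List.filter_append, List.filter_cons, List.filter_nil]
    have hkk' : (k == k') = false := by
      rcases hb : k == k' with _ | _
      · rfl
      · exact absurd (eq_of_beq hb).symm h
    simp [hkk']

-- pushing an insert through the erase-loop of B
theorem eraseFold_insert (keys : List String) (d : PySem.Dict String Int) (k : String) (v : Int) :
    keys.foldl (fun p k => p.erase k) (d.insert k v)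
      = if keys.contains k then keys.foldl (fun p k => p.erase k) d
        else (keys.foldl (fun p k => p.erase k) d).insert k v := by
  induction keys generalizing d with
  | nil => simp
  | cons k' ks ih =>
    simp only [List.foldl_cons, List.contains_cons]
    by_cases hk : k' = k
    · subst hk
      rw [erase_insert_self]
      simp
    · rw [erase_insert_of_ne d k k' v hk]
      rw [ih]
      have hkk' : (k == k') = false := by
        rcases hb : k == k' with _ | _
        · rfl
        · exact absurd (eq_of_beq hb).symm hk
      simp [hkk']

-- the central invariant: B's erase-loop applied to an insert-loop copy equals A's filtered insert-loop
theorem main_invariant (dct : List (String × Int)) (keys : List String) (d : PySem.Dict String Int) :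
    keys.foldl (fun p k => p.erase k) (dct.foldl (fun p kv => p.insert kv.1 kv.2) d)
      = dct.foldl (fun p kv => if keys.contains kv.1 then p else p.insert kv.1 kv.2)
          (keys.foldl (fun p k => p.erase k) d) := by
  induction dct generalizing d with
  | nil => rfl
  | cons kv rest ih =>
    simp only [List.foldl_cons]
    rw [ih, eraseFold_insert]

-- erasing anything from the empty dict leaves it empty
theorem eraseFold_empty (keys : List String) :
    keys.foldl (fun p k => p.erase k) (PySem.Dict.empty : PySem.Dict String Int)
      = PySem.Dict.empty := by
  induction keys with
  | nil => rfl
  | cons k ks ih =>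
    simp only [List.foldl_cons]
    rw [show (PySem.Dict.empty : PySem.Dict String Int).erase k = PySem.Dict.empty from rfl, ih]

-- ===== VERDICT (by name: the statement is the Claim_ definition above) =====
theorem kick_from_dict_spec : Claim_equal_kick_from_dict := by
  intro dct keys _
  show kick_from_dict dct keys = kick_from_dict_alt dct keys
  unfold kick_from_dict kick_from_dict_alt
  rw [popFold_items,
    show PySem.Dict.ofList dct = dct.foldl (fun p kv => p.insert kv.1 kv.2) PySem.Dict.empty from rfl,
    main_invariant, eraseFold_empty]
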